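-- pv_equiv track=rewrite | github.com/bytedance/matxscript | tools/bench_multiprocess.py | sub_thread_entry
-- ===== SOURCE A (Python) =====
-- from typing import List, Any
--
-- def sub_thread_entry(query: str, max_ngram_size: int) -> Any:
--     query = query.strip()
--     query_terms = query.split(' ')
--     ngram_list = []
--
--     for l in range(1, max_ngram_size + 1):
--         for j in range(0, len(query_terms) - l + 1):
--             ngram_list.append(" ".join(query_terms[j: j + l]))
--     return ngram_list
-- ===== SOURCE B (Python) =====
-- def sub_thread_entry(query: str, max_ngram_size: int):
--     query_terms = query.strip().split(' ')
--     if max_ngram_size < 1: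
--         return []
--     prev = list(query_terms)
--     result = list(prev)
--     for l in range(2, max_ngram_size + 1):
--         cur = [p + ' ' + t for p, t in zip(prev, query_terms[l - 1:])]
--         result += cur
--         prev = cur
--     return result
-- ===== Notes on version B (the rewrite author's own statement) =====
-- stated objective: alternative
-- what changed: B builds each n-gram length from the previous length's strings by zipping them with the shifted term list and appending one term, instead of re-slicing and re-joining every window from scratch; the max<1 case becomes an explicit empty-result guard.
import Mathlib
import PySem

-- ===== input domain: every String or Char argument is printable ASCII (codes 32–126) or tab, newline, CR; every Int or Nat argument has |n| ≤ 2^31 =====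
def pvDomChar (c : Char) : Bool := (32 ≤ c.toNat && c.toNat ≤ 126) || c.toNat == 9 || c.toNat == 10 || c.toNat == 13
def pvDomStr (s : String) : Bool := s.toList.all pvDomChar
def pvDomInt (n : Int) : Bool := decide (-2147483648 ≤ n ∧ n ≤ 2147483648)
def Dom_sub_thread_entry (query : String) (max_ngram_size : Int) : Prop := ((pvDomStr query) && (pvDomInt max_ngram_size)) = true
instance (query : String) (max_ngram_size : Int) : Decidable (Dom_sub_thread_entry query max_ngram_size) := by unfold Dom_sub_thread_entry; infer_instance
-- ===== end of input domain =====

-- B builds each n-gram length incrementally from the previous length's strings (zip with shifted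
-- terms) instead of re-slicing and re-joining every window; objective: alternative decomposition.

-- ===== PORT A =====
-- literal port of A: strip, split(' '), then the double loop appending " ".join(query_terms[j:j+l])
def sub_thread_entry (query : String) (max_ngram_size : Int) : List String :=
  let query' := PySem.Str.strip query
  let query_terms := (PySem.Str.split? query' " ").getD []   -- sep " " ≠ "", so split? is always `some`
  (PySem.List.pyRange 1 (max_ngram_size + 1)).foldl
    (fun ngram_list l =>
      (PySem.List.pyRange 0 ((query_terms.length : Int) - l + 1)).foldl
        (fun ngram_list j =>
          ngram_list ++ [PySem.Str.join " " (PySem.List.slice query_terms (some j) (some (j + l)))])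
        ngram_list)
    []

-- ===== PORT B =====
-- literal port of B (Source B): guard max<1, seed prev/result with the terms, then for each l≥2
-- build cur by zipping prev with query_terms[l-1:] and concatenating with a space.
def sub_thread_entry_alt (query : String) (max_ngram_size : Int) : List String :=
  let query_terms := (PySem.Str.split? (PySem.Str.strip query) " ").getD []
  if max_ngram_size < 1 then []
  else
    let st := (PySem.List.pyRange 2 (max_ngram_size + 1)).foldl
      (fun (st : List String × List String) l =>
        let cur := (st.2.zip (PySem.List.slice query_terms (some (l - 1)) none)).map
          (fun pt => pt.1 ++ " " ++ pt.2)
        (st.1 ++ cur, cur))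
      (query_terms, query_terms)
    st.1

-- ===== PRECONDITION & SPEC =====
def Spec_sub_thread_entry (query : String) (max_ngram_size : Int) (out : List String) : Prop := out = sub_thread_entry_alt query max_ngram_size
instance (query : String) (max_ngram_size : Int) (out : List String) : Decidable (Spec_sub_thread_entry query max_ngram_size out) := by unfold Spec_sub_thread_entry; infer_instance

-- ===== CLAIM (what is proved, stated in full; the proofs are below) =====
def Claim_equal_sub_thread_entry : Prop := ∀ (query : String) (max_ngram_size : Int), Dom_sub_thread_entry query max_ngram_size → Spec_sub_thread_entry query max_ngram_size (sub_thread_entry query max_ngram_size)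

-- ===== LEMMAS AND PROOFS =====

-- the n-gram of length l starting at position j
def pvGram (terms : List String) (l j : Nat) : String :=
  PySem.Str.join " " ((terms.drop j).take l)

-- all n-grams of length l, in order of starting position
def pvRow (terms : List String) (l : Nat) : List String :=
  (List.range (terms.length + 1 - l)).map (pvGram terms l)

theorem pvStr_ext {a b : String} (h : a.toList = b.toList) : a = b := String.toList_inj.mp h

theorem pvJoin_snoc (xs : List String) (y : String) (h : xs ≠ []) :
    PySem.Str.join " " (xs ++ [y]) = PySem.Str.join " " xs ++ " " ++ y := by
  apply pvStr_ext
  simp only [String.toList_append, PySem.Str.toList_join, List.map_append, List.map_cons,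
    List.map_nil]
  induction xs with
  | nil => exact absurd rfl h
  | cons x xs ih =>
    cases xs with
    | nil =>
      simp [PySem.Chars.join_cons_cons, PySem.Chars.join_singleton]
    | cons x' xs' =>
      simp only [List.map_cons, List.cons_append, PySem.Chars.join_cons_cons,
        List.map_cons] at ih ⊢
      rw [ih (by simp)]
      simp [List.append_assoc]

theorem pvRow_one (terms : List String) : pvRow terms 1 = terms := by
  apply List.ext_getElem
  · simp [pvRow]
  · intro j h1 h2
    simp only [pvRow, List.getElem_map, List.getElem_range]
    apply pvStr_ext
    have hj : j < terms.length := by simpa [pvRow] using h1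
    have : (terms.drop j).take 1 = [terms[j]] := by
      rw [List.take_one, List.head?_drop, List.getElem?_eq_getElem hj]
      rfl
    rw [pvGram, this]
    simp [PySem.Str.toList_join, PySem.Chars.join_singleton]

theorem pvRow_step (terms : List String) (l : Nat) (hl : 1 ≤ l) :
    ((pvRow terms l).zip (terms.drop l)).map (fun pt => pt.1 ++ " " ++ pt.2)
      = pvRow terms (l + 1) := by
  apply List.ext_getElem
  · simp [pvRow]; omega
  · intro j h1 h2
    have hj : j < terms.length - l := by simp [pvRow] at h2; omega
    have hjr : j < terms.length + 1 - l := by omega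
    simp only [List.getElem_map, List.getElem_zip, pvRow, List.getElem_range, List.getElem_drop]
    show pvGram terms l j ++ " " ++ terms[l + j] = pvGram terms l.succ j
    have hlen : l < (terms.drop j).length := by simp; omega
    have hsucc : (terms.drop j).take (l + 1) = (terms.drop j).take l ++ [terms[l + j]] := by
      rw [List.take_add_one, List.getElem?_eq_getElem hlen]
      simp [Nat.add_comm]
    have hne : (terms.drop j).take l ≠ [] := by
      intro hc
      have := congrArg List.length hc
      simp at this
      omega
    rw [pvGram, pvGram, hsucc, pvJoin_snoc _ _ hne]

-- A's nested loop over one value of l produces exactly pvRow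
theorem pvInner_eq_row (terms : List String) (l : Int) (hl : 1 ≤ l) (acc : List String) :
    (PySem.List.pyRange 0 ((terms.length : Int) - l + 1)).foldl
        (fun ngram_list j =>
          ngram_list ++ [PySem.Str.join " " (PySem.List.slice terms (some j) (some (j + l)))])
        acc
      = acc ++ pvRow terms l.toNat := by
  rw [PySem.List.foldl_append_singleton_eq_map, PySem.List.pyRange_one, List.map_map]
  congr 1
  have hcnt : ((terms.length : Int) - l + 1 - 0).toNat = terms.length + 1 - l.toNat := by omega
  rw [hcnt, pvRow]
  apply List.map_congr_left
  intro j hj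
  simp only [Function.comp_apply, zero_add]
  have hcast : (j : Int) + l = ((j + l.toNat : Nat) : Int) := by push_cast; omega
  rw [hcast, PySem.List.slice_natCast]
  simp [pvGram]

-- B's loop invariant: starting from (res, pvRow l) and running l+1 … l+c, the result
-- accumulates the rows l+1 … l+c and prev ends as pvRow (l+c)
theorem pvLoopB (terms : List String) (c : Nat) : ∀ (l : Nat) (res : List String), 1 ≤ l →
    (PySem.List.pyRange ((l : Int) + 1) ((l : Int) + 1 + c)).foldl
        (fun (st : List String × List String) x =>
          (st.1 ++ (st.2.zip (PySem.List.slice terms (some (x - 1)) none)).map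
              (fun pt => pt.1 ++ " " ++ pt.2),
            (st.2.zip (PySem.List.slice terms (some (x - 1)) none)).map
              (fun pt => pt.1 ++ " " ++ pt.2)))
        (res, pvRow terms l)
      = (res ++ (List.range c).flatMap (fun k => pvRow terms (l + 1 + k)), pvRow terms (l + c)) := by
  induction c with
  | zero =>
    intro l res _
    rw [PySem.List.pyRange_one_eq_nil (by omega)]
    simp
  | succ c ih =>
    intro l res hl
    rw [PySem.List.pyRange_one_cons (by omega)]
    simp only [List.foldl_cons]
    have hdrop : PySem.List.slice terms (some ((l : Int) + 1 - 1)) none = terms.drop l := by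
      have : (l : Int) + 1 - 1 = (l : Nat) := by omega
      rw [this, PySem.List.slice_from_natCast]
    rw [hdrop, pvRow_step terms l hl]
    have harith : (l : Int) + 1 + 1 = ((l + 1 : Nat) : Int) + 1 := by push_cast; ring
    have harith2 : (l : Int) + 1 + (c + 1 : Nat) = ((l + 1 : Nat) : Int) + 1 + c := by
      push_cast; ring
    rw [harith, harith2, ih (l + 1) (res ++ pvRow terms (l + 1)) (by omega)]
    simp only [Prod.mk.injEq]
    refine ⟨?_, by congr 1; omega⟩
    rw [List.range_succ_eq_map]
    simp only [List.flatMap_cons, List.flatMap_map, Nat.add_zero, List.append_assoc]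
    congr 1
    congr 1
    apply List.flatMap_congr
    intro k _
    congr 1
    omega

-- A as a flat concatenation of rows 1 … max
theorem pvA_eq (terms : List String) (M : Int) :
    (PySem.List.pyRange 1 (M + 1)).foldl
        (fun ngram_list l =>
          (PySem.List.pyRange 0 ((terms.length : Int) - l + 1)).foldl
            (fun ngram_list j =>
              ngram_list ++ [PySem.Str.join " " (PySem.List.slice terms (some j) (some (j + l)))])
            ngram_list)
        []
      = (List.range M.toNat).flatMap (fun k => pvRow terms (k + 1)) := by
  have h1 : ∀ (acc : List String), ∀ l ∈ PySem.List.pyRange 1 (M + 1),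
      (PySem.List.pyRange 0 ((terms.length : Int) - l + 1)).foldl
        (fun ngram_list j =>
          ngram_list ++ [PySem.Str.join " " (PySem.List.slice terms (some j) (some (j + l)))])
        acc = acc ++ pvRow terms l.toNat := by
    intro acc l hmem
    have := (PySem.List.mem_pyRange_one).mp hmem
    exact pvInner_eq_row terms l this.1 acc
  rw [PySem.List.foldl_congr_mem _ _ (fun acc l => acc ++ pvRow terms l.toNat) _ h1,
    PySem.List.foldl_append_eq_flatMap, List.nil_append, PySem.List.pyRange_one, List.flatMap_map]
  have hM : (M + 1 - 1).toNat = M.toNat := by omega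
  rw [hM]
  apply List.flatMap_congr
  intro k _
  congr 1
  omega

-- ===== VERDICT (by name: the statement is the Claim_ definition above) =====
theorem sub_thread_entry_spec : Claim_equal_sub_thread_entry := by
  intro query M _
  unfold Spec_sub_thread_entry
  simp only [sub_thread_entry, sub_thread_entry_alt]
  generalize (PySem.Str.split? (PySem.Str.strip query) " ").getD [] = terms
  rw [pvA_eq]
  by_cases hM : M < 1
  · rw [if_pos hM]
    have : M.toNat = 0 := by omega
    simp [this]
  · rw [if_neg hM]
    have hM1 : 1 ≤ M := by omega
    have hB := pvLoopB terms (M - 1).toNat 1 terms (by omega)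
    rw [pvRow_one] at hB
    have e1 : ((1 : Nat) : Int) + 1 = 2 := by norm_num
    have e2 : (2 : Int) + ((M - 1).toNat : Int) = M + 1 := by omega
    rw [e1] at hB
    rw [e2] at hB
    rw [hB]
    simp only
    have hMt : M.toNat = (M - 1).toNat + 1 := by omega
    rw [hMt, List.range_succ_eq_map]
    simp only [List.flatMap_cons, List.flatMap_map, zero_add, pvRow_one]
    congr 1
    apply List.flatMap_congr
    intro k _
    congr 1
    omega
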